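-- pv_equiv track=rewrite | github.com/ABohynDOE/fatld | fatld/relation.py | relabel_word
-- ===== SOURCE A (Python) =====
-- def relabel_word(word: str, m: int) -> str:
--     """
--     Relabel basic factors in a word to their corresponding pseudo-factors.
--
--     Relabel a word containing only two-level factors by replacing the basic
--     factors used as pseudo-factors by their corresponding pseudo-factor labels.
--     The pseudo-factor labels are A_i, B_i and C_i with i = 1,2,3, for the
--     first, second, and third four-level factor, respectively.
--
--     Parameters
--     ----------
--     word : str
--         Word to relabel
--     m : int
--         Number of four-level factors. Define up to which factor the relabeling
--         occurs.
--
--     Examples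
--     --------
--     >>> # The value of `m` define how many factors are relabeled
--     >>> relabel_word(word='abcde', m=1)
--     'A3cde'
--     >>> relabel_word(word='abcde', m=3)
--     'A3B3C1'
--
--     """
--     for i in range(m):
--         pf_factors = [
--             chr(97 + 2 * i),
--             chr(97 + 2 * i + 1),
--             f"{chr(97 + 2 * i)}{chr(97 + 2 * i + 1)}",
--         ]
--         pf_labels = [f"{chr(65 + i)}{x}" for x in [1, 2, 3]]
--         # We start with p1p2 to avoid replacing p1/p2 first and not the
--         # interaction
--         s = (
--             word.replace(pf_factors[2], pf_labels[2])
--             .replace(pf_factors[1], pf_labels[1])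
--             .replace(pf_factors[0], pf_labels[0])
--         )
--         word = s
--     return word
-- ===== SOURCE B (Python) =====
-- def relabel_word(word: str, m: int) -> str:
--     # Build one token->label table, then relabel in a single left-to-right scan
--     # (longest match first), instead of m sequential replace passes.
--     pairs = {}
--     singles = {}
--     for i in range(m):
--         p1 = chr(97 + 2 * i)
--         p2 = chr(97 + 2 * i + 1)
--         letter = chr(65 + i)
--         pairs[p1 + p2] = letter + "3"
--         singles[p1] = letter + "1"
--         singles[p2] = letter + "2"
--     out = []
--     j = 0
--     n = len(word)
--     while j < n:
--         two = word[j : j + 2]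
--         if two in pairs:
--             out.append(pairs[two])
--             j += 2
--         elif word[j] in singles:
--             out.append(singles[word[j]])
--             j += 1
--         else:
--             out.append(word[j])
--             j += 1
--     return "".join(out)
-- ===== Notes on version B (the rewrite author's own statement) =====
-- stated objective: alternative
-- what changed: Replaces the m sequential replace-passes (pair, then p2, then p1, for each factor) by building one token-to-label table up front and relabeling the word in a single left-to-right scan that tries the two-char interaction token before the single-char tokens.
import Mathlib
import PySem

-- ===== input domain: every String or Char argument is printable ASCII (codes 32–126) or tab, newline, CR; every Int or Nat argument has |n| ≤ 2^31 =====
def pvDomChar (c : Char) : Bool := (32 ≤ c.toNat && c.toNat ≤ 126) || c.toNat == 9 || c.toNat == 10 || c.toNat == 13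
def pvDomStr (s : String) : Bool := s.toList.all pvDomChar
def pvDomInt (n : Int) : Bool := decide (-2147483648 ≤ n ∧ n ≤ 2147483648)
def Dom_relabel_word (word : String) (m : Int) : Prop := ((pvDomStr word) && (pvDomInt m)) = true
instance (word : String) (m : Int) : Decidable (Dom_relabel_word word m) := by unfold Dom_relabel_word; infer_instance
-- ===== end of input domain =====

-- B replaces A's m sequential replace-passes by one token→label table plus a single
-- left-to-right scan (two-char interaction tokens tried before single-char tokens).

-- ===== PORT A =====
def relabel_word (word : String) (m : Int) : String :=
  (PySem.List.pyRange 0 m).foldl (fun w i =>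
    let pf_factors : List String :=
      [String.ofList [Char.ofNat (97 + 2 * i).toNat],
       String.ofList [Char.ofNat (97 + 2 * i + 1).toNat],
       String.ofList [Char.ofNat (97 + 2 * i).toNat] ++ String.ofList [Char.ofNat (97 + 2 * i + 1).toNat]]
    let pf_labels : List String :=
      ([1, 2, 3] : List Int).map (fun x => String.ofList [Char.ofNat (65 + i).toNat] ++ PySem.Int.toStr x)
    PySem.Str.replace (PySem.Str.replace (PySem.Str.replace w pf_factors[2]! pf_labels[2]!)
      pf_factors[1]! pf_labels[1]!) pf_factors[0]! pf_labels[0]!) word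

-- ===== PORT B =====
def bTables (m : Int) : PySem.Dict String String × PySem.Dict String String :=
  (PySem.List.pyRange 0 m).foldl
    (fun t i =>
      let p1 := String.ofList [Char.ofNat (97 + 2 * i).toNat]
      let p2 := String.ofList [Char.ofNat (97 + 2 * i + 1).toNat]
      let letter := String.ofList [Char.ofNat (65 + i).toNat]
      (t.1.insert (p1 ++ p2) (letter ++ "3"),
       (t.2.insert p1 (letter ++ "1")).insert p2 (letter ++ "2")))
    (PySem.Dict.mk [], PySem.Dict.mk [])

def bScan (pairs singles : PySem.Dict String String) : List Char → List Char
  | [] => []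
  | [c] =>
    match singles.get? (String.ofList [c]) with
    | some lab => lab.toList
    | none => [c]
  | c :: d :: t =>
    match pairs.get? (String.ofList [c, d]) with
    | some lab => lab.toList ++ bScan pairs singles t
    | none =>
      (match singles.get? (String.ofList [c]) with
       | some lab => lab.toList
       | none => [c]) ++ bScan pairs singles (d :: t)

def relabel_word_alt (word : String) (m : Int) : String :=
  String.ofList (bScan (bTables m).1 (bTables m).2 word.toList)

-- ===== PRECONDITION & SPEC =====
-- Pre_ excludes exactly m ≥ 557008, where Python A raises ValueError (chr() argument out of
-- range, reached at i = 557007); A returns normally on every input with m ≤ 557007.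
def Pre_relabel_word (word : String) (m : Int) : Prop := m ≤ 557007
instance (word : String) (m : Int) : Decidable (Pre_relabel_word word m) := by
  unfold Pre_relabel_word; infer_instance
def pvWitness_relabel_word : String × Int := ("abcde", 3)

def Spec_relabel_word (word : String) (m : Int) (out : String) : Prop := out = relabel_word_alt word m
instance (word : String) (m : Int) (out : String) : Decidable (Spec_relabel_word word m out) := by unfold Spec_relabel_word; infer_instance

-- ===== CLAIM (what is proved, stated in full; the proofs are below) =====
def Claim_equal_relabel_word : Prop := ∀ (word : String) (m : Int), Dom_relabel_word word m → Pre_relabel_word word m → Spec_relabel_word word m (relabel_word word m)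

-- ===== LEMMAS AND PROOFS =====

-- characters used by the relabeling: p1/p2 of factor i and the label letter
def chN (n : Nat) : Char := Char.ofNat n
def cA (i : Nat) : Char := chN (97 + 2 * i)
def cB (i : Nat) : Char := chN (98 + 2 * i)
def cL (i : Nat) : Char := chN (65 + i)

-- fuel-free model of PySem.Chars.replace with a nonempty pattern p :: ps
def repl (p : Char) (ps rep : List Char) : List Char → List Char
  | [] => []
  | c :: t =>
    if (p :: ps).isPrefixOf (c :: t) then rep ++ repl p ps rep (t.drop ps.length)
    else c :: repl p ps rep t
  termination_by l => l.length
  decreasing_by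
  · simp only [List.length_drop, List.length_cons]; omega
  · simp

-- one pass of A (factor i): the pair replaced first, then p2, then p1
def passA (i : Nat) (l : List Char) : List Char :=
  repl (cA i) [] [cL i, '1'] (repl (cB i) [] [cL i, '2'] (repl (cA i) [cB i] [cL i, '3'] l))

def passes (L : List Nat) (l : List Char) : List Char := L.foldl (fun w i => passA i w) l

-- ---- character-code facts ----

theorem toNat_chN_valid {n : Nat} (h : n.isValidChar) : (chN n).toNat = n := by
  simp [chN, Char.ofNat, h, Char.ofNatAux, Char.toNat]

theorem toNat_chN_or (n : Nat) : (chN n).toNat = n ∨ (chN n).toNat = 0 := by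
  by_cases h : n.isValidChar
  · exact Or.inl (toNat_chN_valid h)
  · right; simp [chN, Char.ofNat, h]

theorem toNat_chN_le {n : Nat} (h : n ≤ 126) : (chN n).toNat = n :=
  toNat_chN_valid (Or.inl (by omega))

theorem char_eq_of_toNat {a b : Char} (h : a.toNat = b.toNat) : a = b :=
  Char.ext (UInt32.toNat_inj.mp h)

theorem char_ne_of_toNat {a b : Char} (h : a.toNat ≠ b.toNat) : a ≠ b :=
  fun he => h (congrArg Char.toNat he)

theorem chN_ne {n : Nat} {x : Char} (h0 : x.toNat ≠ 0) (h1 : x.toNat ≠ n) : chN n ≠ x := by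
  intro he
  rcases toNat_chN_or n with hc | hc <;> rw [he] at hc <;> omega

theorem domChar_codes {c : Char} (h : pvDomChar c = true) : c.toNat ≤ 126 ∧ c.toNat ≠ 0 := by
  simp [pvDomChar] at h; omega

theorem toNat_cL {i : Nat} (h : i ≤ 14) : (cL i).toNat = 65 + i := toNat_chN_le (by omega)
theorem toNat_cA {i : Nat} (h : i ≤ 14) : (cA i).toNat = 97 + 2 * i := toNat_chN_le (by omega)
theorem toNat_cB {i : Nat} (h : i ≤ 14) : (cB i).toNat = 98 + 2 * i := toNat_chN_le (by omega)

theorem toNat_d1 : ('1' : Char).toNat = 49 := by decide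
theorem toNat_d2 : ('2' : Char).toNat = 50 := by decide
theorem toNat_d3 : ('3' : Char).toNat = 51 := by decide

theorem notin_pair {x a b : Char} (h1 : x ≠ a) (h2 : x ≠ b) : x ∉ [a, b] := by
  simp [h1, h2]

-- ---- repl basic equations ----

theorem repl_nil (p : Char) (ps rep : List Char) : repl p ps rep [] = [] := by
  simp [repl]

theorem repl_cons (p : Char) (ps rep : List Char) (c : Char) (t : List Char) :
    repl p ps rep (c :: t) =
      if (p :: ps).isPrefixOf (c :: t) then rep ++ repl p ps rep (t.drop ps.length)
      else c :: repl p ps rep t := by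
  rw [repl]

theorem repl1_cons (p : Char) (rep : List Char) (c : Char) (t : List Char) :
    repl p [] rep (c :: t) = (if c = p then rep else [c]) ++ repl p [] rep t := by
  rw [repl_cons]
  by_cases h : c = p
  · subst h
    rw [if_pos (by simp [List.isPrefixOf]), if_pos rfl]
    simp
  · rw [if_neg, if_neg h, List.singleton_append]
    intro hpre
    obtain ⟨s, hs⟩ := List.isPrefixOf_iff_prefix.mp hpre
    rw [List.cons_append] at hs
    injection hs with h1 _
    exact h h1.symm

theorem repl2_hit (p q : Char) (rep : List Char) (t : List Char) :
    repl p [q] rep (p :: q :: t) = rep ++ repl p [q] rep t := by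
  rw [repl_cons]
  rw [if_pos (by simp [List.isPrefixOf])]
  simp

theorem repl2_miss {p q c : Char} {t : List Char} (h : ¬(c = p ∧ t.head? = some q))
    (rep : List Char) : repl p [q] rep (c :: t) = c :: repl p [q] rep t := by
  rw [repl_cons, if_neg]
  intro hpre
  obtain ⟨s, hs⟩ := List.isPrefixOf_iff_prefix.mp hpre
  rw [List.cons_append, List.cons_append] at hs
  apply h
  cases t with
  | nil => simp at hs
  | cons d t' =>
    injection hs with h1 h2
    injection h2 with h2 _
    exact ⟨h1.symm, by simp [h2]⟩

theorem repl_noop {p : Char} {ps rep u : List Char} (h : p ∉ u) :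
    repl p ps rep u = u := by
  induction u with
  | nil => exact repl_nil _ _ _
  | cons c t ih =>
    rw [repl_cons, if_neg, ih (fun hm => h (List.mem_cons_of_mem _ hm))]
    intro hpre
    obtain ⟨s, hs⟩ := List.isPrefixOf_iff_prefix.mp hpre
    rw [List.cons_append] at hs
    injection hs with h1 _
    exact h (h1 ▸ List.mem_cons_self)

theorem repl1_append (p : Char) (rep : List Char) (u v : List Char) :
    repl p [] rep (u ++ v) = repl p [] rep u ++ repl p [] rep v := by
  induction u with
  | nil => simp [repl_nil]
  | cons c t ih => simp [repl1_cons, ih]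

theorem repl2_append (p q : Char) (rep : List Char) :
    ∀ (u v : List Char), (p ∉ u ∨ v.head? ≠ some q) →
      repl p [q] rep (u ++ v) = repl p [q] rep u ++ repl p [q] rep v := by
  suffices H : ∀ (n : Nat) (u v : List Char), u.length ≤ n → (p ∉ u ∨ v.head? ≠ some q) →
      repl p [q] rep (u ++ v) = repl p [q] rep u ++ repl p [q] rep v by
    exact fun u v h => H u.length u v le_rfl h
  intro n
  induction n with
  | zero =>
    intro u v hl _
    have : u = [] := List.eq_nil_of_length_eq_zero (by omega)
    subst this
    simp [repl_nil]
  | succ n ihn =>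
    intro u v hl h
    cases u with
    | nil => simp [repl_nil]
    | cons c u' =>
      by_cases hm : c = p ∧ (u' ++ v).head? = some q
      · obtain ⟨rfl, hq⟩ := hm
        have hnv : v.head? ≠ some q := by
          rcases h with h | h
          · exact absurd List.mem_cons_self h
          · exact h
        cases u' with
        | nil =>
          exfalso
          apply hnv
          simpa using hq
        | cons d u'' =>
          have hd : d = q := by simpa using hq
          subst hd
          rw [List.cons_append, List.cons_append, repl2_hit, repl2_hit,
            ihn u'' v (by simp at hl; omega) (by
              rcases h with h | h
              · exact Or.inl (fun hm2 => h (by simp [hm2]))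
              · exact Or.inr h), List.append_assoc]
      · have hmu : ¬(c = p ∧ u'.head? = some q) := by
          rintro ⟨h1, h2⟩
          apply hm
          refine ⟨h1, ?_⟩
          cases u' with
          | nil => simp at h2
          | cons e u3 => simpa using h2
        rw [List.cons_append, repl2_miss hm, repl2_miss hmu,
          ihn u' v (by simp at hl; omega) (by
            rcases h with h | h
            · exact Or.inl (fun hm2 => h (List.mem_cons_of_mem _ hm2))
            · exact Or.inr h), List.cons_append]

theorem repl_head {p : Char} {ps rep v : List Char} (h : rep ≠ []) :
    (repl p ps rep v).head? = v.head? ∨ (repl p ps rep v).head? = rep.head? := by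
  cases v with
  | nil => left; rw [repl_nil]
  | cons c t =>
    rw [repl_cons]
    split
    · right
      cases rep with
      | nil => exact absurd rfl h
      | cons r rs => simp
    · left; simp

-- ---- passA lemmas ----

theorem passA_nil (i : Nat) : passA i [] = [] := by
  simp [passA, repl_nil]

theorem passA_head (i : Nat) (v : List Char) :
    (passA i v).head? = v.head? ∨ (passA i v).head? = some (cL i) := by
  unfold passA
  rcases repl_head (p := cA i) (ps := []) (rep := [cL i, '1'])
      (v := repl (cB i) [] [cL i, '2'] (repl (cA i) [cB i] [cL i, '3'] v)) (by simp) with h1 | h1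
  · rw [h1]
    rcases repl_head (p := cB i) (ps := []) (rep := [cL i, '2'])
        (v := repl (cA i) [cB i] [cL i, '3'] v) (by simp) with h2 | h2
    · rw [h2]
      rcases repl_head (p := cA i) (ps := [cB i]) (rep := [cL i, '3']) (v := v) (by simp) with h3 | h3
      · exact Or.inl h3
      · exact Or.inr (by rw [h3]; rfl)
    · exact Or.inr (by rw [h2]; rfl)
  · exact Or.inr (by rw [h1]; rfl)

theorem passA_noop {i : Nat} {u : List Char} (hA : cA i ∉ u) (hB : cB i ∉ u) :
    passA i u = u := by
  unfold passA
  rw [repl_noop hA, repl_noop hB, repl_noop hA]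

theorem passA_append {i : Nat} {u v : List Char} (h : cA i ∉ u ∨ v.head? ≠ some (cB i)) :
    passA i (u ++ v) = passA i u ++ passA i v := by
  unfold passA
  rw [repl2_append _ _ _ u v h, repl1_append, repl1_append]

-- ---- passes lemmas ----

theorem passes_cons (j : Nat) (L : List Nat) (w : List Char) :
    passes (j :: L) w = passes L (passA j w) := rfl

theorem passes_append_L (L1 L2 : List Nat) (w : List Char) :
    passes (L1 ++ L2) w = passes L2 (passes L1 w) := by
  unfold passes
  rw [List.foldl_append]

theorem passes_single (j : Nat) (w : List Char) : passes [j] w = passA j w := rfl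

theorem passes_nil (L : List Nat) : passes L [] = [] := by
  induction L with
  | nil => rfl
  | cons j L ih => rw [passes_cons, passA_nil]; exact ih

theorem passes_inert {L : List Nat} {u : List Char}
    (h : ∀ j ∈ L, cA j ∉ u ∧ cB j ∉ u) :
    ∀ v, passes L (u ++ v) = u ++ passes L v := by
  induction L with
  | nil => intro v; rfl
  | cons j L ih =>
    intro v
    have hj := h j List.mem_cons_self
    rw [passes_cons, passes_cons, passA_append (Or.inl hj.1), passA_noop hj.1 hj.2,
      ih (fun j' hj' => h j' (List.mem_cons_of_mem _ hj')) (passA j v)]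

theorem passes_head {L : List Nat} {x : Char} (hL : ∀ j ∈ L, cL j ≠ x) :
    ∀ {v : List Char}, v.head? ≠ some x → (passes L v).head? ≠ some x := by
  induction L with
  | nil => intro v hv; exact hv
  | cons j L ih =>
    intro v hv
    rw [passes_cons]
    apply ih (fun j' hj' => hL j' (List.mem_cons_of_mem _ hj'))
    rcases passA_head j v with h | h
    · rw [h]; exact hv
    · rw [h]; intro he; exact hL j List.mem_cons_self (by injection he)

-- ---- single-pass token steps ----

theorem passA_pair_head {i : Nat} (hi : i ≤ 14) (w : List Char) :
    passA i (cA i :: cB i :: w) = cL i :: '3' :: passA i w := by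
  have hB3 : cB i ∉ [cL i, '3'] :=
    notin_pair (char_ne_of_toNat (by rw [toNat_cB hi, toNat_cL hi]; omega))
      (char_ne_of_toNat (by rw [toNat_cB hi, toNat_d3]; omega))
  have hA3 : cA i ∉ [cL i, '3'] :=
    notin_pair (char_ne_of_toNat (by rw [toNat_cA hi, toNat_cL hi]; omega))
      (char_ne_of_toNat (by rw [toNat_cA hi, toNat_d3]; omega))
  unfold passA
  rw [repl2_hit, repl1_append, repl_noop hB3, repl1_append, repl_noop hA3]
  simp

theorem passA_singleB {i : Nat} (hi : i ≤ 14) (w : List Char) :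
    passA i (cB i :: w) = cL i :: '2' :: passA i w := by
  have hne : cB i ≠ cA i := char_ne_of_toNat (by rw [toNat_cB hi, toNat_cA hi]; omega)
  have hA2 : cA i ∉ [cL i, '2'] :=
    notin_pair (char_ne_of_toNat (by rw [toNat_cA hi, toNat_cL hi]; omega))
      (char_ne_of_toNat (by rw [toNat_cA hi, toNat_d2]; omega))
  unfold passA
  rw [repl2_miss (fun hx => hne hx.1), repl1_cons, if_pos rfl, repl1_append, repl_noop hA2]
  simp

theorem passA_singleA {i : Nat} (hi : i ≤ 14) {w : List Char}
    (hw : w.head? ≠ some (cB i)) :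
    passA i (cA i :: w) = cL i :: '1' :: passA i w := by
  have hne : cA i ≠ cB i := char_ne_of_toNat (by rw [toNat_cA hi, toNat_cB hi]; omega)
  unfold passA
  rw [repl2_miss (fun hx => hw hx.2), repl1_cons, if_neg hne, List.singleton_append,
    repl1_cons, if_pos rfl]
  simp

-- ---- token lemmas over all passes ----

theorem lab_inert {i : Nat} (hi : i ≤ 14) {d : Char}
    (hd : d.toNat = 49 ∨ d.toNat = 50 ∨ d.toNat = 51) :
    ∀ j, cA j ∉ [cL i, d] ∧ cB j ∉ [cL i, d] := by
  intro j
  constructor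
  · exact notin_pair (chN_ne (by rw [toNat_cL hi]; omega) (by rw [toNat_cL hi]; omega))
      (chN_ne (by omega) (by omega))
  · exact notin_pair (chN_ne (by rw [toNat_cL hi]; omega) (by rw [toNat_cL hi]; omega))
      (chN_ne (by omega) (by omega))

theorem tok_pair {i : Nat} (hi : i ≤ 14) :
    ∀ {M : Nat}, i < M → ∀ v,
      passes (List.range M) (cA i :: cB i :: v) = cL i :: '3' :: passes (List.range M) v := by
  intro M
  induction M with
  | zero => omega
  | succ M' ih =>
    intro hM v
    rw [List.range_succ, passes_append_L, passes_append_L]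
    by_cases hcase : i < M'
    · rw [ih hcase]
      have hsplit := passes_inert (L := [M']) (u := [cL i, '3'])
        (fun j _ => lab_inert hi (Or.inr (Or.inr toNat_d3)) j) (passes (List.range M') v)
      simpa using hsplit
    · have hie : i = M' := by omega
      subst hie
      have hsplit := passes_inert (L := List.range i) (u := [cA i, cB i])
        (fun j hj => by
          have hj' : j < i := List.mem_range.mp hj
          have hj14 : j ≤ 14 := by omega
          exact ⟨notin_pair (char_ne_of_toNat (by rw [toNat_cA hj14, toNat_cA hi]; omega))
              (char_ne_of_toNat (by rw [toNat_cA hj14, toNat_cB hi]; omega)),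
            notin_pair (char_ne_of_toNat (by rw [toNat_cB hj14, toNat_cA hi]; omega))
              (char_ne_of_toNat (by rw [toNat_cB hj14, toNat_cB hi]; omega))⟩) v
      have h1 : passes (List.range i) (cA i :: cB i :: v) = cA i :: cB i :: passes (List.range i) v := by
        simpa using hsplit
      rw [h1, passes_single, passes_single, passA_pair_head hi]

theorem tok_singleB {i : Nat} (hi : i ≤ 14) :
    ∀ {M : Nat}, i < M → ∀ v,
      passes (List.range M) (cB i :: v) = cL i :: '2' :: passes (List.range M) v := by
  intro M
  induction M with
  | zero => omega
  | succ M' ih =>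
    intro hM v
    rw [List.range_succ, passes_append_L, passes_append_L]
    by_cases hcase : i < M'
    · rw [ih hcase]
      have hsplit := passes_inert (L := [M']) (u := [cL i, '2'])
        (fun j _ => lab_inert hi (Or.inr (Or.inl toNat_d2)) j) (passes (List.range M') v)
      simpa using hsplit
    · have hie : i = M' := by omega
      subst hie
      have hsplit := passes_inert (L := List.range i) (u := [cB i])
        (fun j hj => by
          have hj' : j < i := List.mem_range.mp hj
          have hj14 : j ≤ 14 := by omega
          exact ⟨by simp [char_ne_of_toNat (by rw [toNat_cA hj14, toNat_cB hi]; omega : (cA j).toNat ≠ (cB i).toNat)],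
            by simp [char_ne_of_toNat (by rw [toNat_cB hj14, toNat_cB hi]; omega : (cB j).toNat ≠ (cB i).toNat)]⟩) v
      have h1 : passes (List.range i) (cB i :: v) = cB i :: passes (List.range i) v := by
        simpa using hsplit
      rw [h1, passes_single, passes_single, passA_singleB hi]

theorem tok_singleA {i : Nat} (hi : i ≤ 14) :
    ∀ {M : Nat}, i < M → ∀ {v}, v.head? ≠ some (cB i) →
      passes (List.range M) (cA i :: v) = cL i :: '1' :: passes (List.range M) v := by
  intro M
  induction M with
  | zero => omega
  | succ M' ih =>
    intro hM v hv
    rw [List.range_succ, passes_append_L, passes_append_L]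
    by_cases hcase : i < M'
    · rw [ih hcase hv]
      have hsplit := passes_inert (L := [M']) (u := [cL i, '1'])
        (fun j _ => lab_inert hi (Or.inl toNat_d1) j) (passes (List.range M') v)
      simpa using hsplit
    · have hie : i = M' := by omega
      subst hie
      have hsplit := passes_inert (L := List.range i) (u := [cA i])
        (fun j hj => by
          have hj' : j < i := List.mem_range.mp hj
          have hj14 : j ≤ 14 := by omega
          exact ⟨by simp [char_ne_of_toNat (by rw [toNat_cA hj14, toNat_cA hi]; omega : (cA j).toNat ≠ (cA i).toNat)],
            by simp [char_ne_of_toNat (by rw [toNat_cB hj14, toNat_cA hi]; omega : (cB j).toNat ≠ (cA i).toNat)]⟩) v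
      have h1 : passes (List.range i) (cA i :: v) = cA i :: passes (List.range i) v := by
        simpa using hsplit
      have hhd : (passes (List.range i) v).head? ≠ some (cB i) := by
        apply passes_head (fun j hj => ?_) hv
        have hj' : j < i := List.mem_range.mp hj
        exact char_ne_of_toNat (by rw [toNat_cL (by omega), toNat_cB hi]; omega)
      rw [h1, passes_single, passes_single, passA_singleA hi hhd]

theorem tok_skip {M : Nat} {c : Char} (h : ∀ j, j < M → cA j ≠ c ∧ cB j ≠ c) (v : List Char) :
    passes (List.range M) (c :: v) = c :: passes (List.range M) v := by
  have := passes_inert (L := List.range M) (u := [c])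
    (fun j hj => by
      have hh := h j (List.mem_range.mp hj)
      exact ⟨by simp [hh.1], by simp [hh.2]⟩) v
  simpa using this

-- ---- dict characterizations ----

theorem bTables_nonpos {m : Int} (h : m ≤ 0) :
    bTables m = (PySem.Dict.mk [], PySem.Dict.mk []) := by
  unfold bTables
  rw [PySem.List.pyRange_one_eq_nil h]
  rfl

theorem bTables_succ (M : Nat) :
    bTables ((M : Int) + 1) =
      ((bTables (M : Int)).1.insert (String.ofList [cA M, cB M]) (String.ofList [cL M, '3']),
       (((bTables (M : Int)).2.insert (String.ofList [cA M]) (String.ofList [cL M, '1'])).insert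
         (String.ofList [cB M]) (String.ofList [cL M, '2']))) := by
  have h1 : ("1" : String).toList = ['1'] := by decide
  have h2 : ("2" : String).toList = ['2'] := by decide
  have h3 : ("3" : String).toList = ['3'] := by decide
  unfold bTables
  rw [PySem.List.pyRange_one_succ_right (Int.natCast_nonneg M), List.foldl_append]
  simp only [List.foldl_cons, List.foldl_nil]
  have e1 : ((97 : Int) + 2 * (M : Int)).toNat = 97 + 2 * M := by omega
  have e2 : ((97 : Int) + 2 * (M : Int) + 1).toNat = 98 + 2 * M := by omega
  have e3 : ((65 : Int) + (M : Int)).toNat = 65 + M := by omega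
  rw [e1, e2, e3]
  have hk : String.ofList [Char.ofNat (97 + 2 * M)] ++ String.ofList [Char.ofNat (98 + 2 * M)]
      = String.ofList [cA M, cB M] := String.toList_inj.mp (by simp [cA, cB, chN])
  have hv1 : String.ofList [Char.ofNat (65 + M)] ++ "1" = String.ofList [cL M, '1'] :=
    String.toList_inj.mp (by simp [cL, chN, h1])
  have hv2 : String.ofList [Char.ofNat (65 + M)] ++ "2" = String.ofList [cL M, '2'] :=
    String.toList_inj.mp (by simp [cL, chN, h2])
  have hv3 : String.ofList [Char.ofNat (65 + M)] ++ "3" = String.ofList [cL M, '3'] :=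
    String.toList_inj.mp (by simp [cL, chN, h3])
  rw [hk, hv1, hv2, hv3]
  rfl

theorem pairs_get (M : Nat) {c d : Char} (hc : pvDomChar c = true) (hd : pvDomChar d = true) :
    (bTables (M : Int)).1.get? (String.ofList [c, d]) =
      if 97 ≤ c.toNat ∧ (c.toNat - 97) % 2 = 0 ∧ (c.toNat - 97) / 2 < M ∧ d.toNat = c.toNat + 1
      then some (String.ofList [cL ((c.toNat - 97) / 2), '3']) else none := by
  obtain ⟨hcle, hcne⟩ := domChar_codes hc
  obtain ⟨hdle, hdne⟩ := domChar_codes hd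
  induction M with
  | zero =>
    rw [Nat.cast_zero, bTables_nonpos le_rfl, if_neg (by omega)]
    simp [PySem.Dict.get?]
  | succ M' ih =>
    rw [Nat.cast_succ, bTables_succ M']
    by_cases hq : String.ofList [c, d] = String.ofList [cA M', cB M']
    · have hl : c = cA M' ∧ d = cB M' := by
        have h2 := congrArg String.toList hq
        simpa using h2
      have hM14 : M' ≤ 14 := by
        rcases toNat_chN_or (97 + 2 * M') with hx | hx
        · have hcx : c.toNat = 97 + 2 * M' := by rw [hl.1]; exact hx
          omega
        · have hcx : c.toNat = 0 := by rw [hl.1]; exact hx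
          omega
      have hcc : c.toNat = 97 + 2 * M' := by rw [hl.1]; exact toNat_cA hM14
      have hdd : d.toNat = 98 + 2 * M' := by rw [hl.2]; exact toNat_cB hM14
      rw [hq, PySem.Dict.get?_insert_self,
        if_pos ⟨by omega, by omega, by omega, by omega⟩,
        show (c.toNat - 97) / 2 = M' from by omega]
    · rw [PySem.Dict.get?_insert_of_ne _ _ hq, ih]
      by_cases hcond : 97 ≤ c.toNat ∧ (c.toNat - 97) % 2 = 0 ∧ (c.toNat - 97) / 2 < M' + 1 ∧ d.toNat = c.toNat + 1
      · have hlt : (c.toNat - 97) / 2 < M' := by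
          by_contra hge
          have hie : (c.toNat - 97) / 2 = M' := by omega
          have hM14 : M' ≤ 14 := by omega
          apply hq
          have hc' : c = cA M' := char_eq_of_toNat (by rw [toNat_cA hM14]; omega)
          have hd' : d = cB M' := char_eq_of_toNat (by rw [toNat_cB hM14]; omega)
          rw [hc', hd']
        rw [if_pos ⟨hcond.1, hcond.2.1, hlt, hcond.2.2.2⟩, if_pos hcond]
      · rw [if_neg (fun hh => hcond ⟨hh.1, hh.2.1, by omega, hh.2.2.2⟩), if_neg hcond]

theorem singles_get (M : Nat) {c : Char} (hc : pvDomChar c = true) :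
    (bTables (M : Int)).2.get? (String.ofList [c]) =
      if 97 ≤ c.toNat ∧ (c.toNat - 97) / 2 < M
      then some (String.ofList [cL ((c.toNat - 97) / 2),
        if (c.toNat - 97) % 2 = 0 then '1' else '2']) else none := by
  obtain ⟨hcle, hcne⟩ := domChar_codes hc
  induction M with
  | zero =>
    rw [Nat.cast_zero, bTables_nonpos le_rfl, if_neg (by omega)]
    simp [PySem.Dict.get?]
  | succ M' ih =>
    rw [Nat.cast_succ, bTables_succ M']
    by_cases hq2 : String.ofList [c] = String.ofList [cB M']
    · have hl : c = cB M' := by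
        have h2 := congrArg String.toList hq2
        simpa using h2
      have hM14 : M' ≤ 14 := by
        rcases toNat_chN_or (98 + 2 * M') with hx | hx
        · have hcx : c.toNat = 98 + 2 * M' := by rw [hl]; exact hx
          omega
        · have hcx : c.toNat = 0 := by rw [hl]; exact hx
          omega
      have hcc : c.toNat = 98 + 2 * M' := by rw [hl]; exact toNat_cB hM14
      rw [hq2, PySem.Dict.get?_insert_self, if_pos ⟨by omega, by omega⟩,
        show (c.toNat - 97) / 2 = M' from by omega, if_neg (by omega)]
    · rw [PySem.Dict.get?_insert_of_ne _ _ hq2]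
      by_cases hq1 : String.ofList [c] = String.ofList [cA M']
      · have hl : c = cA M' := by
          have h2 := congrArg String.toList hq1
          simpa using h2
        have hM14 : M' ≤ 14 := by
          rcases toNat_chN_or (97 + 2 * M') with hx | hx
          · have hcx : c.toNat = 97 + 2 * M' := by rw [hl]; exact hx
            omega
          · have hcx : c.toNat = 0 := by rw [hl]; exact hx
            omega
        have hcc : c.toNat = 97 + 2 * M' := by rw [hl]; exact toNat_cA hM14
        rw [hq1, PySem.Dict.get?_insert_self, if_pos ⟨by omega, by omega⟩,
          show (c.toNat - 97) / 2 = M' from by omega, if_pos (by omega)]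
      · rw [PySem.Dict.get?_insert_of_ne _ _ hq1, ih]
        by_cases hcond : 97 ≤ c.toNat ∧ (c.toNat - 97) / 2 < M' + 1
        · have hlt : (c.toNat - 97) / 2 < M' := by
            by_contra hge
            have hie : (c.toNat - 97) / 2 = M' := by omega
            have hM14 : M' ≤ 14 := by omega
            by_cases hpar : (c.toNat - 97) % 2 = 0
            · exact hq1 (by rw [show c = cA M' from char_eq_of_toNat (by rw [toNat_cA hM14]; omega)])
            · exact hq2 (by rw [show c = cB M' from char_eq_of_toNat (by rw [toNat_cB hM14]; omega)])
          rw [if_pos ⟨hcond.1, hlt⟩, if_pos hcond]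
        · rw [if_neg (fun hh => hcond ⟨hh.1, by omega⟩), if_neg hcond]

-- ---- main scan/passes agreement ----

theorem main_scan (M : Nat) :
    ∀ (w : List Char), (∀ ch ∈ w, pvDomChar ch = true) →
      bScan (bTables (M : Int)).1 (bTables (M : Int)).2 w = passes (List.range M) w
  | [] => fun _ => by rw [passes_nil]; rfl
  | [c] => fun h => by
    have hc := h c (by simp)
    obtain ⟨hcle, hcne⟩ := domChar_codes hc
    simp only [bScan]
    rw [singles_get M hc]
    by_cases hcond : 97 ≤ c.toNat ∧ (c.toNat - 97) / 2 < M
    · rw [if_pos hcond]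
      have hi14 : (c.toNat - 97) / 2 ≤ 14 := by omega
      by_cases hpar : (c.toNat - 97) % 2 = 0
      · have hcA : c = cA ((c.toNat - 97) / 2) :=
          char_eq_of_toNat (by rw [toNat_cA hi14]; omega)
        rw [if_pos hpar]
        conv_rhs => rw [hcA]
        rw [tok_singleA hi14 hcond.2 (by simp), passes_nil]
        simp
      · have hcB : c = cB ((c.toNat - 97) / 2) :=
          char_eq_of_toNat (by rw [toNat_cB hi14]; omega)
        rw [if_neg hpar]
        conv_rhs => rw [hcB]
        rw [tok_singleB hi14 hcond.2, passes_nil]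
        simp
    · rw [if_neg hcond]
      have hkeys : ∀ j, j < M → cA j ≠ c ∧ cB j ≠ c := by
        intro j hj
        constructor
        · apply chN_ne hcne
          intro hx
          exact hcond (by omega)
        · apply chN_ne hcne
          intro hx
          exact hcond (by omega)
      rw [tok_skip hkeys, passes_nil]
  | c :: d :: t => fun h => by
    have hc := h c (by simp)
    have hd := h d (by simp)
    have ht : ∀ ch ∈ t, pvDomChar ch = true := fun ch hch => h ch (by simp [hch])
    have hdt : ∀ ch ∈ d :: t, pvDomChar ch = true := fun ch hch => h ch (by
      rcases List.mem_cons.mp hch with rfl | hh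
      · simp
      · simp [hh])
    obtain ⟨hcle, hcne⟩ := domChar_codes hc
    obtain ⟨hdle, hdne⟩ := domChar_codes hd
    simp only [bScan]
    rw [pairs_get M hc hd]
    by_cases hpair : 97 ≤ c.toNat ∧ (c.toNat - 97) % 2 = 0 ∧ (c.toNat - 97) / 2 < M ∧ d.toNat = c.toNat + 1
    · rw [if_pos hpair]
      have hi14 : (c.toNat - 97) / 2 ≤ 14 := by omega
      have hcA : c = cA ((c.toNat - 97) / 2) :=
        char_eq_of_toNat (by rw [toNat_cA hi14]; omega)
      have hdB : d = cB ((c.toNat - 97) / 2) :=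
        char_eq_of_toNat (by rw [toNat_cB hi14]; omega)
      conv_rhs => rw [hcA, hdB]
      rw [tok_pair hi14 hpair.2.2.1]
      simp [main_scan M t ht]
    · rw [if_neg hpair, singles_get M hc]
      by_cases hs : 97 ≤ c.toNat ∧ (c.toNat - 97) / 2 < M
      · rw [if_pos hs]
        have hi14 : (c.toNat - 97) / 2 ≤ 14 := by omega
        by_cases hpar : (c.toNat - 97) % 2 = 0
        · have hcA : c = cA ((c.toNat - 97) / 2) :=
            char_eq_of_toNat (by rw [toNat_cA hi14]; omega)
          have hhd : (d :: t).head? ≠ some (cB ((c.toNat - 97) / 2)) := by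
            intro he
            have hdB : d = cB ((c.toNat - 97) / 2) := by simpa using he
            have hdd : d.toNat = 98 + 2 * ((c.toNat - 97) / 2) := by
              rw [hdB, toNat_cB hi14]
            exact hpair ⟨hs.1, hpar, hs.2, by omega⟩
          rw [if_pos hpar]
          conv_rhs => rw [hcA]
          rw [tok_singleA hi14 hs.2 hhd]
          simp [main_scan M (d :: t) hdt]
        · have hcB : c = cB ((c.toNat - 97) / 2) :=
            char_eq_of_toNat (by rw [toNat_cB hi14]; omega)
          rw [if_neg hpar]
          conv_rhs => rw [hcB]
          rw [tok_singleB hi14 hs.2]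
          simp [main_scan M (d :: t) hdt]
      · rw [if_neg hs]
        have hkeys : ∀ j, j < M → cA j ≠ c ∧ cB j ≠ c := by
          intro j hj
          constructor
          · apply chN_ne hcne
            intro hx
            exact hs (by omega)
          · apply chN_ne hcne
            intro hx
            exact hs (by omega)
        rw [tok_skip hkeys]
        simp [main_scan M (d :: t) hdt]
  termination_by w => w.length

-- ---- bridge for port A ----

theorem replace_go_spec (p : Char) (ps rep : List Char) :
    ∀ (fuel : Nat) (l acc : List Char), l.length ≤ fuel →
      PySem.Chars.replace.go (p :: ps) rep fuel l acc = acc.reverse ++ repl p ps rep l := by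
  intro fuel
  induction fuel with
  | zero =>
    intro l acc hl
    have hnil : l = [] := by
      cases l with
      | nil => rfl
      | cons a b => simp at hl
    subst hnil
    rw [repl_nil]
    simp [PySem.Chars.replace.go]
  | succ f ihf =>
    intro l acc hl
    cases l with
    | nil =>
      rw [repl_nil]
      simp [PySem.Chars.replace.go]
    | cons ch t =>
      rw [repl_cons]
      by_cases hp : (p :: ps).isPrefixOf (ch :: t) = true
      · have hgo : PySem.Chars.replace.go (p :: ps) rep (f + 1) (ch :: t) acc
            = PySem.Chars.replace.go (p :: ps) rep f (t.drop ps.length) (rep.reverse ++ acc) := by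
          simp [PySem.Chars.replace.go, hp]
        rw [hgo, ihf (t.drop ps.length) (rep.reverse ++ acc)
          (by simp only [List.length_drop]; simp at hl; omega), if_pos hp]
        simp
      · have hgo : PySem.Chars.replace.go (p :: ps) rep (f + 1) (ch :: t) acc
            = PySem.Chars.replace.go (p :: ps) rep f t (ch :: acc) := by
          simp [PySem.Chars.replace.go, hp]
        rw [hgo, ihf t (ch :: acc) (by simp at hl; omega), if_neg hp]
        simp

theorem replace_eq_repl (l : List Char) (p : Char) (ps rep : List Char) :
    PySem.Chars.replace l (p :: ps) rep = repl p ps rep l := by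
  unfold PySem.Chars.replace
  rw [if_neg (by simp)]
  simpa using replace_go_spec p ps rep l.length l [] le_rfl

theorem pyRange0 (m : Int) :
    PySem.List.pyRange 0 m = (List.range m.toNat).map (fun k : Nat => (k : Int)) := by
  rcases (by omega : m ≤ 0 ∨ 0 < m) with h | h
  · rw [PySem.List.pyRange_one_eq_nil h]
    have h0 : m.toNat = 0 := by omega
    rw [h0]
    rfl
  · conv_lhs => rw [← Int.toNat_of_nonneg h.le]
    exact PySem.List.pyRange_zero_natCast m.toNat

theorem stepA_eq (w : String) (k : Nat) :
    (PySem.Str.replace (PySem.Str.replace (PySem.Str.replace w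
        (String.ofList [Char.ofNat ((97 : Int) + 2 * (k : Int)).toNat] ++
          String.ofList [Char.ofNat ((97 : Int) + 2 * (k : Int) + 1).toNat])
        (String.ofList [Char.ofNat ((65 : Int) + (k : Int)).toNat] ++ PySem.Int.toStr 3))
        (String.ofList [Char.ofNat ((97 : Int) + 2 * (k : Int) + 1).toNat])
        (String.ofList [Char.ofNat ((65 : Int) + (k : Int)).toNat] ++ PySem.Int.toStr 2))
        (String.ofList [Char.ofNat ((97 : Int) + 2 * (k : Int)).toNat])
        (String.ofList [Char.ofNat ((65 : Int) + (k : Int)).toNat] ++ PySem.Int.toStr 1)).toList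
      = passA k w.toList := by
  have e1 : ((97 : Int) + 2 * (k : Int)).toNat = 97 + 2 * k := by omega
  have e2 : ((97 : Int) + 2 * (k : Int) + 1).toNat = 98 + 2 * k := by omega
  have e3 : ((65 : Int) + (k : Int)).toNat = 65 + k := by omega
  have t1 : (PySem.Int.toStr 1).toList = ['1'] := by decide
  have t2 : (PySem.Int.toStr 2).toList = ['2'] := by decide
  have t3 : (PySem.Int.toStr 3).toList = ['3'] := by decide
  rw [e1, e2, e3]
  simp only [PySem.Str.toList_replace, String.toList_append, String.toList_ofList, t1, t2, t3,
    List.singleton_append]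
  rw [replace_eq_repl, replace_eq_repl, replace_eq_repl]
  simp only [passA, cA, cB, cL, chN]

theorem bridgeA (word : String) (m : Int) :
    (relabel_word word m).toList = passes (List.range m.toNat) word.toList := by
  unfold relabel_word
  rw [pyRange0, List.foldl_map]
  generalize List.range m.toNat = L
  induction L generalizing word with
  | nil => rfl
  | cons k L ih =>
    rw [List.foldl_cons, ih, passes_cons]
    simp only [List.getElem!_cons_succ, List.getElem!_cons_zero, List.map_cons, List.map_nil]
    rw [stepA_eq word k]

theorem bTables_toNat (m : Int) : bTables m = bTables (m.toNat : Int) := by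
  rcases (by omega : m ≤ 0 ∨ 0 < m) with h | h
  · rw [bTables_nonpos h, (by omega : m.toNat = 0), Nat.cast_zero, bTables_nonpos le_rfl]
  · rw [Int.toNat_of_nonneg h.le]

-- ===== VERDICT (by name: the statement is the Claim_ definition above) =====
theorem relabel_word_spec : Claim_equal_relabel_word := by
  intro word m hdom _hpre
  unfold Spec_relabel_word
  apply String.toList_inj.mp
  have hboth : pvDomStr word = true ∧ pvDomInt m = true := by
    simpa [Dom_relabel_word] using hdom
  have hw : ∀ ch ∈ word.toList, pvDomChar ch = true :=
    fun ch hch => List.all_eq_true.mp hboth.1 ch hch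
  have halt : (relabel_word_alt word m).toList = bScan (bTables m).1 (bTables m).2 word.toList := by
    unfold relabel_word_alt
    simp
  rw [bridgeA, halt, bTables_toNat]
  exact (main_scan m.toNat word.toList hw).symm
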